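-- pv_equiv track=rewrite | github.com/ztime/polska | FolkWiki.py | _filter_song
-- ===== SOURCE A (Python) =====
-- def _filter_song(song_lines, valid_info):
--     #Function to reduce linesize
--     def r(key, hay):
--         return hay.get(key, "")
--     v = {}
--     songs_in_key = {}
--     current_parsing_song = False
--     current_parsing_song_key = None
--     for line in song_lines:
--         if len(line.strip()) == 0:
--             continue
--         s = line.split(":")
--         if s[0] == 'K' and len(s) == 2:
--             current_parsing_song_key = s[1].strip()
--             current_parsing_song = True
--             songs_in_key[current_parsing_song_key] = []
--             #Skip to the next line with actual song
--             continue
--         if current_parsing_song: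
--             songs_in_key[current_parsing_song_key].append(line.strip())
--             #more song lines
--             continue
--         if s[0] in valid_info:
--             v[s[0]] = s[1].strip()
--     #One file can contain several keys
--     for key,song in songs_in_key.items():
--         ret = [ r(x,v) for x in valid_info ]
--         ret.append(key)
--         ret.append(''.join(song))
--         yield ret
-- ===== SOURCE B (Python) =====
-- def _filter_song(song_lines, valid_info):
--     lines = [l for l in song_lines if l.strip()]
--
--     def is_key(l):
--         s = l.split(':')
--         return len(s) == 2 and s[0] == 'K'
--
--     # index of the first 'K:' line (len(lines) if none)
--     i = next((j for j, l in enumerate(lines) if is_key(l)), len(lines))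
--
--     v = {}
--     for l in lines[:i]:
--         s = l.split(':')
--         if s[0] in valid_info:
--             v[s[0]] = s[1].strip()
--     info = [v.get(x, '') for x in valid_info]
--
--     def segments(d, ls):
--         # ls is empty or starts with a 'K:' line; each call consumes one whole
--         # segment, located by searching for the next 'K:' line, as a slice
--         if not ls:
--             return d
--         k = ls[0].split(':')[1].strip()
--         rest = ls[1:]
--         n = next((j for j, l in enumerate(rest) if is_key(l)), len(rest))
--         d[k] = ''.join(l.strip() for l in rest[:n])
--         return segments(d, rest[n:])
--
--     return [info + [k, s] for k, s in segments({}, lines[i:]).items()]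
-- ===== Notes on version B (the rewrite author's own statement) =====
-- stated objective: alternative
-- what changed: Replaces A's per-line state machine (parsing flag, current-key variable, list mutation per line) by an index/slice decomposition: locate the first 'K:' line by search, build the header dict from the prefix slice, then recursively consume one whole segment per step by searching for the next 'K:' boundary and slicing the segment out, joining it immediately.
import Mathlib
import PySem

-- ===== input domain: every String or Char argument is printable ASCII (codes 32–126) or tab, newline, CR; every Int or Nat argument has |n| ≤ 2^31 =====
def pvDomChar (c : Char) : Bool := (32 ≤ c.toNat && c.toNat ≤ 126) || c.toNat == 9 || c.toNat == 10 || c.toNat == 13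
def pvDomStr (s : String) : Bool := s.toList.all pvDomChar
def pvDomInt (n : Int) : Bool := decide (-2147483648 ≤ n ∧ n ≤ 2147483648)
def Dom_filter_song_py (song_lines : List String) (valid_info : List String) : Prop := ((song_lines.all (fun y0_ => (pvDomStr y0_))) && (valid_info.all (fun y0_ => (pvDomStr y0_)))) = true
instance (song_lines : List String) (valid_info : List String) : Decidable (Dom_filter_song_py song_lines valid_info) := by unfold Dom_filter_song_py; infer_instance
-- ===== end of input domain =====

-- B replaces A's per-line state machine (parsing flag + current key + per-line list
-- mutation) by an index/slice decomposition: search for the first 'K:' line, build the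
-- header dict from the prefix slice, then recursively cut out one whole segment per step
-- by searching for the next 'K:' boundary. Same cost; objective: alternative. A is a
-- generator; both sides are compared as the list of yielded rows.

-- line.split(":") — ":" is a nonempty separator, so split? is always `some`
def pvSplit (line : String) : List String := (PySem.Str.split? line ":").getD [line]

-- ===== PORT A =====
structure PVStA where
  v : PySem.Dict String String
  songs : PySem.Dict String (List String)
  parsing : Bool
  key : Option String

def pvStepA (valid_info : List String) (st : PVStA) (line : String) : PVStA :=
  if PySem.Str.strip line = "" then st
  else
    let s := pvSplit line
    if s.headD "" = "K" ∧ s.length = 2 then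
      let k := PySem.Str.strip (s.getD 1 "")
      ⟨st.v, st.songs.insert k ([] : List String), true, some k⟩
    else if st.parsing then
      -- songs_in_key[current_parsing_song_key].append(line.strip()); key is always `some` here
      match st.key with
      | some k => ⟨st.v, st.songs.modify k [] (· ++ [PySem.Str.strip line]), st.parsing, st.key⟩
      | none => st
    else if s.headD "" ∈ valid_info then
      -- s.getD 1 "": Python raises IndexError when the line has no ':'; Pre_ excludes that
      ⟨st.v.insert (s.headD "") (PySem.Str.strip (s.getD 1 "")), st.songs, st.parsing, st.key⟩
    else st

def filter_song_py (song_lines : List String) (valid_info : List String) : List (List String) :=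
  let fin := song_lines.foldl (pvStepA valid_info) ⟨.empty, .empty, false, none⟩
  fin.songs.items.map (fun p => valid_info.map (fun x => fin.v.getD x "") ++ [p.1, PySem.Str.join "" p.2])

-- ===== PORT B =====
def pvIsKey (line : String) : Bool :=
  let s := pvSplit line
  s.length == 2 && s.headD "" == "K"

-- next((j for j, l in enumerate(ls) if is_key(l)), len(ls))
def pvFirstKey (ls : List String) : Int :=
  ((((PySem.List.enumerate ls).find? (fun q => pvIsKey q.2)).map (·.1)).getD (ls.length : Int))

-- indices produced by enumerate are ≥ the start value (termination of pvSegments)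
theorem pv_enum_le {α : Type} : ∀ (ls : List α) (s : Int) (q : Int × α),
    q ∈ PySem.List.enumerate ls s → s ≤ q.1 := by
  intro ls
  induction ls with
  | nil => intro s q h; simp [PySem.List.enumerate] at h
  | cons x t ih =>
      intro s q h
      simp only [PySem.List.enumerate, List.mem_cons] at h
      rcases h with h | h
      · subst h; simp
      · have := ih (s + 1) q h; omega

theorem pvFirstKey_nonneg (ls : List String) : 0 ≤ pvFirstKey ls := by
  unfold pvFirstKey
  cases hf : (PySem.List.enumerate ls).find? (fun q => pvIsKey q.2) with
  | none => simp
  | some q =>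
      have hm := List.mem_of_find?_eq_some hf
      have := pv_enum_le ls 0 q hm
      simpa using this

def pvStepInfo (valid_info : List String) (v : PySem.Dict String String) (line : String) : PySem.Dict String String :=
  let s := pvSplit line
  if s.headD "" ∈ valid_info then v.insert (s.headD "") (PySem.Str.strip (s.getD 1 "")) else v

theorem pvSegs_dec (rest : List String) :
    (PySem.List.slice rest (some (pvFirstKey rest)) none).length < rest.length + 1 := by
  rw [PySem.List.slice_from rest (pvFirstKey_nonneg rest)]
  have : (List.drop (pvFirstKey rest).toNat rest).length = rest.length - (pvFirstKey rest).toNat :=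
    List.length_drop
  omega

def pvSegments (d : PySem.Dict String String) : List String → PySem.Dict String String
  | [] => d
  | l0 :: rest =>
    let k := PySem.Str.strip ((pvSplit l0).getD 1 "")
    let n := pvFirstKey rest
    let seg := PySem.Str.join "" ((PySem.List.slice rest none (some n)).map PySem.Str.strip)
    pvSegments (d.insert k seg) (PySem.List.slice rest (some n) none)
termination_by ls => ls.length
decreasing_by exact pvSegs_dec rest

def filter_song_py_alt (song_lines : List String) (valid_info : List String) : List (List String) :=
  let lines := song_lines.filter (fun l => PySem.Str.strip l ≠ "")
  let i := pvFirstKey lines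
  let v := (PySem.List.slice lines none (some i)).foldl (pvStepInfo valid_info) .empty
  let info := valid_info.map (fun x => v.getD x "")
  (pvSegments .empty (PySem.List.slice lines (some i) none)).items.map (fun p => info ++ [p.1, p.2])

-- ===== PRECONDITION & SPEC =====
-- Pre_ excludes exactly the inputs where Python A raises IndexError: a non-blank line
-- without ':' occurring before the first valid 'K:' line whose full text is in valid_info
-- (there A evaluates s[1] of a one-element split).
def Pre_filter_song_py (song_lines : List String) (valid_info : List String) : Prop :=
  ∀ l ∈ (song_lines.filter (fun s => PySem.Str.strip s ≠ "")).takeWhile (fun l => !pvIsKey l),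
    (pvSplit l).length = 1 → l ∉ valid_info
instance (song_lines : List String) (valid_info : List String) : Decidable (Pre_filter_song_py song_lines valid_info) := by unfold Pre_filter_song_py; infer_instance

def pvWitness_filter_song_py : List String × List String := (["T:x", "K: G", "abc"], ["T"])

def Spec_filter_song_py (song_lines : List String) (valid_info : List String) (out : List (List String)) : Prop := out = filter_song_py_alt song_lines valid_info
instance (song_lines : List String) (valid_info : List String) (out : List (List String)) : Decidable (Spec_filter_song_py song_lines valid_info out) := by unfold Spec_filter_song_py; infer_instance

-- ===== CLAIM (what is proved, stated in full; the proofs are below) =====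
def Claim_equal_filter_song_py : Prop := ∀ (song_lines : List String) (valid_info : List String), Dom_filter_song_py song_lines valid_info → Pre_filter_song_py song_lines valid_info → Spec_filter_song_py song_lines valid_info (filter_song_py song_lines valid_info)

-- ===== LEMMAS AND PROOFS =====

-- reference step for A's song-collection phase (proof-side only)
def pvStepSeg (st : PySem.Dict String (List String) × Option String) (line : String) :
    PySem.Dict String (List String) × Option String :=
  if pvIsKey line then
    let k := PySem.Str.strip ((pvSplit line).getD 1 "")
    (st.1.insert k ([] : List String), some k)
  else
    match st.2 with
    | some k => (st.1.modify k [] (· ++ [PySem.Str.strip line]), st.2)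
    | none => st

-- d with every stored segment joined
def pvJoinD (d : PySem.Dict String (List String)) : PySem.Dict String String :=
  PySem.Dict.mk (d.items.map (fun p => (p.1, PySem.Str.join "" p.2)))

theorem pvIsKey_iff (l : String) :
    pvIsKey l = true ↔ ((pvSplit l).headD "" = "K" ∧ (pvSplit l).length = 2) := by
  simp [pvIsKey, and_comm]

theorem pvIsKey_eq_false (l : String)
    (h : ¬ ((pvSplit l).headD "" = "K" ∧ (pvSplit l).length = 2)) : pvIsKey l = false := by
  rw [Bool.eq_false_iff]
  intro hk
  exact h ((pvIsKey_iff l).mp hk)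

theorem pvStepA_blank (vi : List String) (st : PVStA) (l : String)
    (h : PySem.Str.strip l = "") : pvStepA vi st l = st := by
  simp [pvStepA, h]

theorem pvStepA_key (vi : List String) (st : PVStA) (l : String)
    (hb : PySem.Str.strip l ≠ "") (hkey : (pvSplit l).headD "" = "K" ∧ (pvSplit l).length = 2) :
    pvStepA vi st l = ⟨st.v, st.songs.insert (PySem.Str.strip ((pvSplit l).getD 1 "")) ([] : List String),
      true, some (PySem.Str.strip ((pvSplit l).getD 1 ""))⟩ := by
  simp only [pvStepA]
  rw [if_neg hb, if_pos hkey]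

theorem pvStepA_info (vi : List String) (v : PySem.Dict String String)
    (segs : PySem.Dict String (List String)) (l : String)
    (hb : PySem.Str.strip l ≠ "") (hkey : ¬ ((pvSplit l).headD "" = "K" ∧ (pvSplit l).length = 2)) :
    pvStepA vi ⟨v, segs, false, none⟩ l = ⟨pvStepInfo vi v l, segs, false, none⟩ := by
  simp only [pvStepA, pvStepInfo]
  rw [if_neg hb, if_neg hkey]
  by_cases hmem : (pvSplit l).headD "" ∈ vi
  · rw [if_pos hmem, if_neg (by simp), if_pos hmem]
  · rw [if_neg hmem, if_neg (by simp), if_neg hmem]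

theorem pvStepA_song (vi : List String) (v : PySem.Dict String String)
    (segs : PySem.Dict String (List String)) (k : Option String) (l : String)
    (hb : PySem.Str.strip l ≠ "") (hkey : ¬ ((pvSplit l).headD "" = "K" ∧ (pvSplit l).length = 2)) :
    pvStepA vi ⟨v, segs, true, k⟩ l
      = ⟨v, (pvStepSeg (segs, k) l).1, true, (pvStepSeg (segs, k) l).2⟩ := by
  simp only [pvStepA, pvStepSeg]
  rw [if_neg hb, if_neg hkey, if_pos trivial, if_neg (by simp [pvIsKey_eq_false l hkey])]
  cases k <;> rfl

theorem pvStepSeg_key (st : PySem.Dict String (List String) × Option String) (l : String)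
    (hk : pvIsKey l = true) :
    pvStepSeg st l = (st.1.insert (PySem.Str.strip ((pvSplit l).getD 1 "")) ([] : List String),
      some (PySem.Str.strip ((pvSplit l).getD 1 ""))) := by
  simp only [pvStepSeg]
  rw [if_pos hk]

theorem foldA_filter (vi : List String) : ∀ (ls : List String) (st : PVStA),
    ls.foldl (pvStepA vi) st
      = (ls.filter (fun l => PySem.Str.strip l ≠ "")).foldl (pvStepA vi) st := by
  intro ls
  induction ls with
  | nil => intro st; rfl
  | cons l t ih =>
      intro st
      by_cases h : PySem.Str.strip l = ""
      · simp [List.foldl_cons, h, pvStepA_blank vi st l h, ih]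
      · simp [List.foldl_cons, h, ih]

theorem phase1 (vi : List String) : ∀ (ls : List String),
    (∀ l ∈ ls, pvIsKey l = false) → (∀ l ∈ ls, PySem.Str.strip l ≠ "") →
    ∀ (v : PySem.Dict String String) (segs : PySem.Dict String (List String)),
    ls.foldl (pvStepA vi) ⟨v, segs, false, none⟩
      = ⟨ls.foldl (pvStepInfo vi) v, segs, false, none⟩ := by
  intro ls
  induction ls with
  | nil => intro _ _ v segs; rfl
  | cons l t ih =>
      intro hk hb v segs
      have hkl : pvIsKey l = false := hk l (by simp)
      have hnotkey : ¬ ((pvSplit l).headD "" = "K" ∧ (pvSplit l).length = 2) := by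
        intro h; rw [← pvIsKey_iff] at h; simp [h] at hkl
      rw [List.foldl_cons, pvStepA_info vi v segs l (hb l (by simp)) hnotkey, List.foldl_cons,
        ih (fun x hx => hk x (by simp [hx])) (fun x hx => hb x (by simp [hx]))]

theorem phase2 (vi : List String) : ∀ (ls : List String),
    (∀ l ∈ ls, PySem.Str.strip l ≠ "") →
    ∀ (v : PySem.Dict String String) (segs : PySem.Dict String (List String)) (cur : Option String),
    ls.foldl (pvStepA vi) ⟨v, segs, true, cur⟩
      = ⟨v, (ls.foldl pvStepSeg (segs, cur)).1, true, (ls.foldl pvStepSeg (segs, cur)).2⟩ := by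
  intro ls
  induction ls with
  | nil => intro _ v segs cur; rfl
  | cons l t ih =>
      intro hb v segs cur
      have hbl : PySem.Str.strip l ≠ "" := hb l (by simp)
      have ht : ∀ x ∈ t, PySem.Str.strip x ≠ "" := fun x hx => hb x (by simp [hx])
      by_cases hkey : (pvSplit l).headD "" = "K" ∧ (pvSplit l).length = 2
      · rw [List.foldl_cons, pvStepA_key vi _ l hbl hkey, List.foldl_cons,
          pvStepSeg_key (segs, cur) l ((pvIsKey_iff l).mpr hkey), ih ht]
      · rw [List.foldl_cons, pvStepA_song vi v segs cur l hbl hkey, List.foldl_cons, ih ht]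

theorem pvMain (vi : List String) (lines : List String)
    (hmem : ∀ l ∈ lines, PySem.Str.strip l ≠ "") :
    (lines.foldl (pvStepA vi) ⟨.empty, .empty, false, none⟩).v
        = (lines.takeWhile (fun l => !pvIsKey l)).foldl (pvStepInfo vi) .empty ∧
    (lines.foldl (pvStepA vi) ⟨.empty, .empty, false, none⟩).songs
        = ((lines.dropWhile (fun l => !pvIsKey l)).foldl pvStepSeg (.empty, none)).1 := by
  have hhk : ∀ l ∈ lines.takeWhile (fun l => !pvIsKey l), pvIsKey l = false := by
    intro l hl
    have := List.mem_takeWhile_imp hl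
    simpa using this
  have hhb : ∀ l ∈ lines.takeWhile (fun l => !pvIsKey l), PySem.Str.strip l ≠ "" :=
    fun l hl => hmem l ((List.takeWhile_sublist _).mem hl)
  have h1 : lines.foldl (pvStepA vi) ⟨.empty, .empty, false, none⟩
      = (lines.dropWhile (fun l => !pvIsKey l)).foldl (pvStepA vi)
          ⟨(lines.takeWhile (fun l => !pvIsKey l)).foldl (pvStepInfo vi) .empty, .empty, false, none⟩ := by
    conv_lhs => rw [← List.takeWhile_append_dropWhile (p := fun l => !pvIsKey l) (l := lines)]
    rw [List.foldl_append, phase1 vi _ hhk hhb]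
  rw [h1]
  cases hrest : lines.dropWhile (fun l => !pvIsKey l) with
  | nil => exact ⟨rfl, rfl⟩
  | cons r rs =>
      have hrk : pvIsKey r = true := by
        have := List.head_dropWhile_not (fun l => !pvIsKey l) (l := lines) (by simp [hrest])
        simp only [hrest, List.head_cons] at this
        simpa using this
      have hrb : ∀ l ∈ r :: rs, PySem.Str.strip l ≠ "" := by
        intro l hl
        exact hmem l ((List.dropWhile_sublist _).mem (by rw [hrest]; exact hl))
      rw [List.foldl_cons, pvStepA_key vi _ r (hrb r (by simp)) ((pvIsKey_iff r).mp hrk),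
        List.foldl_cons, pvStepSeg_key (PySem.Dict.empty, none) r hrk,
        phase2 vi rs (fun x hx => hrb x (by simp [hx]))]
      exact ⟨rfl, rfl⟩

-- pvFirstKey is the length of the keyless prefix
theorem pvFirstKey_gen : ∀ (ls : List String) (s : Int),
    ((((PySem.List.enumerate ls s).find? (fun q => pvIsKey q.2)).map (·.1)).getD (s + ls.length))
      = s + ((ls.takeWhile (fun l => !pvIsKey l)).length : Int) := by
  intro ls
  induction ls with
  | nil => intro s; simp [PySem.List.enumerate]
  | cons l t ih =>
      intro s
      simp only [PySem.List.enumerate, List.find?_cons]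
      by_cases hk : pvIsKey l = true
      · simp [hk]
      · have hk' : pvIsKey l = false := by rw [Bool.eq_false_iff]; exact hk
        have := ih (s + 1)
        simp only [hk', List.takeWhile_cons, Bool.not_false, if_pos, List.length_cons]
        push_cast
        push_cast at this
        rw [show s + ((t.length : Int) + 1) = (s + 1) + (t.length : Int) by ring, this]
        ring

theorem pvFirstKey_eq (ls : List String) :
    pvFirstKey ls = ((ls.takeWhile (fun l => !pvIsKey l)).length : Int) := by
  have := pvFirstKey_gen ls 0
  simpa [pvFirstKey] using this

theorem pvSlice_take (ls : List String) :
    PySem.List.slice ls none (some (pvFirstKey ls)) = ls.takeWhile (fun l => !pvIsKey l) := by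
  rw [PySem.List.slice_to ls (pvFirstKey_nonneg ls), pvFirstKey_eq]
  simp
  exact ((List.prefix_iff_eq_take).mp (List.takeWhile_prefix _)).symm

theorem pvSlice_drop (ls : List String) :
    PySem.List.slice ls (some (pvFirstKey ls)) none = ls.dropWhile (fun l => !pvIsKey l) := by
  rw [PySem.List.slice_from ls (pvFirstKey_nonneg ls), pvFirstKey_eq]
  simp
  exact (congrArg (fun l => List.drop (ls.takeWhile (fun l => !pvIsKey l)).length l)
      (List.takeWhile_append_dropWhile (p := fun l => !pvIsKey l) (l := ls)).symm).trans
    List.drop_left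

theorem pvJoinD_empty : pvJoinD PySem.Dict.empty = PySem.Dict.empty := rfl

theorem pvJoinD_contains (d : PySem.Dict String (List String)) (k : String) :
    (pvJoinD d).contains k = d.contains k := by
  simp only [pvJoinD, PySem.Dict.contains, List.any_map]
  rfl

theorem pvJoinD_insert (d : PySem.Dict String (List String)) (k : String) (xs : List String) :
    pvJoinD (d.insert k xs) = (pvJoinD d).insert k (PySem.Str.join "" xs) := by
  unfold PySem.Dict.insert
  by_cases hc : d.contains k = true
  · have hc2 : (pvJoinD d).contains k = true := by rw [pvJoinD_contains]; exact hc
    rw [if_pos hc, if_pos hc2]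
    simp only [pvJoinD, List.map_map]
    congr 1
    apply List.map_congr_left
    intro p _
    by_cases hp : p.1 = k <;> simp [hp]
  · have hc2 : ¬ (pvJoinD d).contains k = true := by rw [pvJoinD_contains]; exact hc
    rw [if_neg hc, if_neg hc2]
    simp [pvJoinD]

theorem pvDrop_head (xs : List String) :
    xs.dropWhile (fun l => !pvIsKey l) = []
      ∨ pvIsKey ((xs.dropWhile (fun l => !pvIsKey l)).headD "") = true := by
  cases hre : xs.dropWhile (fun l => !pvIsKey l) with
  | nil => exact Or.inl rfl
  | cons r rs =>
      right
      have := List.head_dropWhile_not (fun l => !pvIsKey l) (l := xs) (by simp [hre])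
      simp only [hre, List.head_cons] at this
      simp only [List.headD_cons]
      simpa using this

-- a run of non-key lines appends their stripped forms to the current segment
theorem pvSeg_batch : ∀ (body : List String), (∀ l ∈ body, pvIsKey l = false) →
    ∀ (d : PySem.Dict String (List String)) (k : String) (acc : List String),
    body.foldl pvStepSeg (d.insert k acc, some k)
      = (d.insert k (acc ++ body.map PySem.Str.strip), some k) := by
  intro body
  induction body with
  | nil => intro _ d k acc; simp
  | cons x t ih =>
      intro hk d k acc
      have hx : pvIsKey x = false := hk x (by simp)
      rw [List.foldl_cons]
      have hstep : pvStepSeg (d.insert k acc, some k) x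
          = (d.insert k (acc ++ [PySem.Str.strip x]), some k) := by
        simp only [pvStepSeg, hx, Bool.false_eq_true, if_false, PySem.Dict.modify]
        rw [PySem.Dict.getD_insert_self, PySem.Dict.insert_insert_self]
      rw [hstep, ih (fun l hl => hk l (by simp [hl])) d k (acc ++ [PySem.Str.strip x])]
      simp

-- A's segment fold, joined, is B's recursive slice-consuming segments function
theorem pvSeg_main : ∀ (n : Nat) (ls : List String), ls.length ≤ n →
    (ls = [] ∨ pvIsKey (ls.headD "") = true) →
    ∀ (d : PySem.Dict String (List String)) (c : Option String),
    pvJoinD ((ls.foldl pvStepSeg (d, c)).1) = pvSegments (pvJoinD d) ls := by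
  intro n
  induction n with
  | zero =>
      intro ls hlen _ d c
      have : ls = [] := List.eq_nil_of_length_eq_zero (Nat.le_zero.mp hlen)
      subst this
      simp [pvSegments]
  | succ m ih =>
      intro ls hlen hhd d c
      cases ls with
      | nil => simp [pvSegments]
      | cons l0 rest =>
          have hk : pvIsKey l0 = true := by
            rcases hhd with h | h
            · exact absurd h (by simp)
            · simpa using h
          set k := PySem.Str.strip ((pvSplit l0).getD 1 "") with hkdef
          rw [List.foldl_cons, pvStepSeg_key (d, c) l0 hk]
          -- split rest into the keyless body and the tail starting at the next key
          have hsplit := List.takeWhile_append_dropWhile (p := fun l => !pvIsKey l) (l := rest)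
          set body := rest.takeWhile (fun l => !pvIsKey l) with hbody
          set rest' := rest.dropWhile (fun l => !pvIsKey l) with hrest'
          have hbk : ∀ l ∈ body, pvIsKey l = false := by
            intro l hl
            have := List.mem_takeWhile_imp hl
            simpa using this
          have hfold : (body ++ rest').foldl pvStepSeg (d.insert k ([] : List String), some k)
              = rest'.foldl pvStepSeg (d.insert k (body.map PySem.Str.strip), some k) := by
            rw [List.foldl_append, pvSeg_batch body hbk d k []]
            simp
          have hlen' : rest'.length ≤ m := by
            have h1 : rest'.length ≤ rest.length := List.Sublist.length_le (List.dropWhile_sublist _)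
            simp only [List.length_cons] at hlen
            omega
          have hhd' : rest' = [] ∨ pvIsKey (rest'.headD "") = true := by
            rw [hrest']
            exact pvDrop_head rest
          have hrec := ih rest' hlen' hhd' (d.insert k (body.map PySem.Str.strip)) (some k)
          calc pvJoinD (((rest).foldl pvStepSeg (d.insert k ([] : List String), some k)).1)
              = pvJoinD ((rest'.foldl pvStepSeg (d.insert k (body.map PySem.Str.strip), some k)).1) := by
                conv_lhs => rw [← hsplit]
                rw [hfold]
            _ = pvSegments (pvJoinD (d.insert k (body.map PySem.Str.strip))) rest' := hrec
            _ = pvSegments (pvJoinD d) (l0 :: rest) := by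
                rw [pvJoinD_insert]
                conv_rhs => rw [pvSegments]
                rw [pvSlice_take rest, pvSlice_drop rest, ← hbody, ← hrest', ← hkdef]

-- ===== VERDICT (by name: the statement is the Claim_ definition above) =====
theorem filter_song_py_spec : Claim_equal_filter_song_py := by
  intro song_lines valid_info _ _
  simp only [Spec_filter_song_py, filter_song_py, filter_song_py_alt]
  rw [foldA_filter]
  have hmem : ∀ l ∈ song_lines.filter (fun l => PySem.Str.strip l ≠ ""),
      PySem.Str.strip l ≠ "" := by
    intro l hl
    exact of_decide_eq_true (List.mem_filter.mp hl).2
  set lines := song_lines.filter (fun l => PySem.Str.strip l ≠ "") with hlines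
  obtain ⟨hv, hs⟩ := pvMain valid_info lines hmem
  rw [hv, hs, pvSlice_take, pvSlice_drop]
  have hhd := pvDrop_head lines
  have hseg := pvSeg_main (lines.dropWhile (fun l => !pvIsKey l)).length _ le_rfl hhd
      PySem.Dict.empty none
  rw [pvJoinD_empty] at hseg
  rw [← hseg]
  simp [pvJoinD, List.map_map]
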